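-- pv_equiv track=rewrite | github.com/abph/goita | backend/app.py | _compress_kifu_moves
-- ===== SOURCE A (Python) =====
-- from typing import Any, Dict, List, Optional, Tuple, Set
--
-- def _compress_kifu_moves(moves: List[List[str]]) -> List[List[str]]:
--     out: List[List[str]] = []
--     for row in moves:
--         if not row or len(row) < 3:
--             continue
--         pid, b, a = str(row[0]), str(row[1]), str(row[2])
--         if b == "パス" or b.lower() == "pass":
--             continue
--         if out:
--             lp, lb, la = out[-1]
--             if lp == pid and la == "" and lb != "" and b == "" and a != "":
--                 out[-1] = [lp, lb, a]
--                 continue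
--         out.append([pid, b, a])
--     return out
-- ===== SOURCE B (Python) =====
-- from typing import List
--
-- def _compress_kifu_moves(moves: List[List[str]]) -> List[List[str]]:
--     # pass 1: filter/normalize into triples
--     cleaned = []
--     for row in moves:
--         if row and len(row) >= 3:
--             pid, b, a = str(row[0]), str(row[1]), str(row[2])
--             if b != "パス" and b.lower() != "pass":
--                 cleaned.append((pid, b, a))
--     # pass 2: merge adjacent pairs (merges never cascade, so a lookahead-by-two scan suffices)
--     out: List[List[str]] = []
--     i, n = 0, len(cleaned)
--     while i < n:
--         pid, b, a = cleaned[i]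
--         if i + 1 < n:
--             p2, b2, a2 = cleaned[i + 1]
--             if p2 == pid and a == "" and b != "" and b2 == "" and a2 != "":
--                 out.append([pid, b, a2])
--                 i += 2
--                 continue
--         out.append([pid, b, a])
--         i += 1
--     return out
-- ===== Notes on version B (the rewrite author's own statement) =====
-- stated objective: alternative
-- what changed: A's single loop that mutates out[-1] is replaced by two passes: a filter/normalize pass producing cleaned triples, then a lookahead-by-two merge scan that emits each row (or merged pair) once, with no re-reading or rewriting of the output list; correctness relies on merges never cascading.
import Mathlib
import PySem

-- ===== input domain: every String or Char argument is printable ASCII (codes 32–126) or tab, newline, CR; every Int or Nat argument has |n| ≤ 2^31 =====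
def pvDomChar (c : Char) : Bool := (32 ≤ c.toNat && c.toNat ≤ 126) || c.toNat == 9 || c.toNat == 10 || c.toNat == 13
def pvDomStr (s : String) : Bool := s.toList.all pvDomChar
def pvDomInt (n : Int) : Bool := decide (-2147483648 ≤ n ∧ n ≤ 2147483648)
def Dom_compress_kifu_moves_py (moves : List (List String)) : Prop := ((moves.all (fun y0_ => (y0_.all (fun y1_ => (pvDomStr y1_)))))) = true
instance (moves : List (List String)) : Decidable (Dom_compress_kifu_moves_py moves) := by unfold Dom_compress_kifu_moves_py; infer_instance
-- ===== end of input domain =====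

-- B replaces A's single loop that mutates out[-1] by a filter/normalize pass followed by a
-- two-at-a-time lookahead merge scan (merges never cascade); same return value, similar cost.

-- ===== PORT A =====
-- one iteration of A's loop body after the skip-guards: check out[-1], merge or append
def stepA (out : List (List String)) (pid b a : String) : List (List String) :=
  match out.getLast? with
  | some (lp :: lb :: la :: []) =>
      if lp = pid ∧ la = "" ∧ lb ≠ "" ∧ b = "" ∧ a ≠ "" then
        out.dropLast ++ [[lp, lb, a]]
      else out ++ [[pid, b, a]]
  | some _ => out ++ [[pid, b, a]]  -- unreachable: out only ever holds 3-element rows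
  | none => out ++ [[pid, b, a]]

def goA : List (List String) → List (List String) → List (List String)
  | [], out => out
  | row :: rest, out =>
    match row with
    | pid :: b :: a :: _ =>
      if b = "パス" ∨ PySem.Str.lower b = "pass" then goA rest out
      else goA rest (stepA out pid b a)
    | _ => goA rest out   -- `not row or len(row) < 3`

def compress_kifu_moves_py (moves : List (List String)) : List (List String) :=
  goA moves []

-- ===== PORT B =====
-- pass 1: filter/normalize rows into triples
def cleanB : List (List String) → List (String × String × String)
  | [] => []
  | (pid :: b :: a :: _) :: rest =>
      if b ≠ "パス" ∧ PySem.Str.lower b ≠ "pass" then (pid, b, a) :: cleanB rest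
      else cleanB rest
  | _ :: rest => cleanB rest

-- pass 2: lookahead-by-two merge scan
def mergeB : List (String × String × String) → List (List String)
  | [] => []
  | [(pid, b, a)] => [[pid, b, a]]
  | (pid, b, a) :: (p2, b2, a2) :: rest =>
      if p2 = pid ∧ a = "" ∧ b ≠ "" ∧ b2 = "" ∧ a2 ≠ "" then
        [pid, b, a2] :: mergeB rest
      else [pid, b, a] :: mergeB ((p2, b2, a2) :: rest)

def compress_kifu_moves_py_alt (moves : List (List String)) : List (List String) :=
  mergeB (cleanB moves)

-- ===== PRECONDITION & SPEC =====
def Spec_compress_kifu_moves_py (moves : List (List String)) (out : List (List String)) : Prop := out = compress_kifu_moves_py_alt moves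
instance (moves : List (List String)) (out : List (List String)) : Decidable (Spec_compress_kifu_moves_py moves out) := by unfold Spec_compress_kifu_moves_py; infer_instance

-- ===== CLAIM (what is proved, stated in full; the proofs are below) =====
def Claim_equal_compress_kifu_moves_py : Prop := ∀ (moves : List (List String)), Dom_compress_kifu_moves_py moves → Spec_compress_kifu_moves_py moves (compress_kifu_moves_py moves)

-- ===== LEMMAS AND PROOFS =====

-- A's merge condition against a given last row, as a predicate on (last row, next triple)
def condP (x : List String) (t : String × String × String) : Prop :=
  match x with
  | [lp, lb, la] => lp = t.1 ∧ la = "" ∧ lb ≠ "" ∧ t.2.1 = "" ∧ t.2.2 ≠ ""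
  | _ => False

def stepT (out : List (List String)) (t : String × String × String) : List (List String) :=
  stepA out t.1 t.2.1 t.2.2

lemma goA_eq_foldl : ∀ (moves : List (List String)) (out : List (List String)),
    goA moves out = List.foldl stepT out (cleanB moves) := by
  intro moves
  induction moves with
  | nil => intro out; simp [goA, cleanB]
  | cons row rest ih =>
    intro out
    match row with
    | [] => simpa [goA, cleanB] using ih out
    | [x] => simpa [goA, cleanB] using ih out
    | [x, y] => simpa [goA, cleanB] using ih out
    | pid :: b :: a :: tl =>
      by_cases h : b = "パス" ∨ PySem.Str.lower b = "pass"
      · have h' : ¬ (b ≠ "パス" ∧ PySem.Str.lower b ≠ "pass") := by tauto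
        simp only [goA, cleanB, if_pos h, if_neg h']
        exact ih out
      · push Not at h
        simp only [goA, cleanB, if_neg (by tauto : ¬ (b = "パス" ∨ PySem.Str.lower b = "pass")), if_pos h]
        simpa [stepT] using ih (stepA out pid b a)

lemma step_append (out : List (List String)) (pid b a : String)
    (h : ∀ x, out.getLast? = some x → ¬ condP x (pid, b, a)) :
    stepA out pid b a = out ++ [[pid, b, a]] := by
  unfold stepA
  cases hL : out.getLast? with
  | none => rfl
  | some x =>
    match x with
    | [] => rfl
    | [_] => rfl
    | [_, _] => rfl
    | lp :: lb :: la :: c :: tl => rfl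
    | [lp, lb, la] =>
      have := h [lp, lb, la] hL
      simp only [condP] at this
      exact if_neg this

lemma foldl_step_eq_mergeB : ∀ (l : List (String × String × String)) (out : List (List String)),
    (∀ x t, out.getLast? = some x → l.head? = some t → ¬ condP x t) →
    List.foldl stepT out l = out ++ mergeB l := by
  intro l
  induction l using mergeB.induct with
  | case1 => intro out _; simp [mergeB]
  | case2 pid b a =>
    intro out h
    have hs : stepA out pid b a = out ++ [[pid, b, a]] :=
      step_append out pid b a (fun x hx => h x (pid, b, a) hx rfl)
    simp [mergeB, List.foldl, stepT, hs]
  | case3 pid b a p2 b2 a2 rest hc ih =>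
    intro out h
    obtain ⟨hp, ha, hb, hb2, ha2⟩ := hc
    have hs : stepA out pid b a = out ++ [[pid, b, a]] :=
      step_append out pid b a (fun x hx => h x (pid, b, a) hx rfl)
    have hs2 : stepA (out ++ [[pid, b, a]]) p2 b2 a2
        = out ++ [[pid, b, a2]] := by
      unfold stepA
      rw [List.getLast?_concat]
      simp only
      rw [if_pos ⟨hp.symm, ha, hb, hb2, ha2⟩, List.dropLast_concat]
    have hrec : List.foldl stepT (out ++ [[pid, b, a2]]) rest
        = (out ++ [[pid, b, a2]]) ++ mergeB rest := by
      apply ih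
      intro x t hx ht
      rw [List.getLast?_concat] at hx
      cases hx
      simp only [condP]
      intro hcc
      exact ha2 hcc.2.1
    simp only [List.foldl, stepT, hs, hs2, hrec, mergeB,
      if_pos (⟨hp, ha, hb, hb2, ha2⟩ : p2 = pid ∧ a = "" ∧ b ≠ "" ∧ b2 = "" ∧ a2 ≠ "")]
    simp
  | case4 pid b a p2 b2 a2 rest hc ih =>
    intro out h
    have hs : stepA out pid b a = out ++ [[pid, b, a]] :=
      step_append out pid b a (fun x hx => h x (pid, b, a) hx rfl)
    have hrec : List.foldl stepT (out ++ [[pid, b, a]]) ((p2, b2, a2) :: rest)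
        = (out ++ [[pid, b, a]]) ++ mergeB ((p2, b2, a2) :: rest) := by
      apply ih
      intro x t hx ht
      rw [List.getLast?_concat] at hx
      cases hx
      cases ht
      simp only [condP]
      intro hcc
      exact hc ⟨hcc.1.symm, hcc.2⟩
    simp only [List.foldl_cons, stepT] at hrec ⊢
    rw [hs, hrec, mergeB, if_neg hc]
    simp

-- ===== VERDICT (by name: the statement is the Claim_ definition above) =====
theorem compress_kifu_moves_py_spec : Claim_equal_compress_kifu_moves_py := by
  intro moves _
  unfold Spec_compress_kifu_moves_py compress_kifu_moves_py compress_kifu_moves_py_alt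
  rw [goA_eq_foldl]
  rw [foldl_step_eq_mergeB (cleanB moves) [] (by intro x t hx ht; simp at hx)]
  simp
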